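-- pv_equiv track=rewrite | github.com/lauralonalzate/TextLab-IA-de-Edici-n-de-textos | backend/app/api/middleware/audit.py | _route_matches
-- ===== SOURCE A (Python) =====
-- def _route_matches(pattern: str, route_path: str) -> bool:
--     """Check if route path matches pattern"""
--     # Simple pattern matching for {id} placeholders
--     pattern_parts = pattern.split("/")
--     route_parts = route_path.split("/")
--
--     if len(pattern_parts) != len(route_parts):
--         return False
--
--     for pattern_part, route_part in zip(pattern_parts, route_parts):
--         if pattern_part.startswith("{") and pattern_part.endswith("}"):
--             continue  # Placeholder matches anything
--         if pattern_part != route_part: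
--             return False
--
--     return True
-- ===== SOURCE B (Python) =====
-- def _route_matches(pattern: str, route_path: str) -> bool:
--     """Check if route path matches pattern (lock-step recursion over segments)."""
--     def go(ps, rs):
--         if not ps and not rs:
--             return True
--         if not ps or not rs:
--             return False
--         p, r = ps[0], rs[0]
--         if p == r or (p.startswith("{") and p.endswith("}")):
--             return go(ps[1:], rs[1:])
--         return False
--     return go(pattern.split("/"), route_path.split("/"))
-- ===== Notes on version B (the rewrite author's own statement) =====
-- stated objective: alternative
-- what changed: Replaces A's explicit length check plus a for-loop over zip(pattern_parts, route_parts) with a single lock-step recursion over the two segment lists that handles a length mismatch structurally (empty vs non-empty cases) and recurses segment by segment.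
import Mathlib
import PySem

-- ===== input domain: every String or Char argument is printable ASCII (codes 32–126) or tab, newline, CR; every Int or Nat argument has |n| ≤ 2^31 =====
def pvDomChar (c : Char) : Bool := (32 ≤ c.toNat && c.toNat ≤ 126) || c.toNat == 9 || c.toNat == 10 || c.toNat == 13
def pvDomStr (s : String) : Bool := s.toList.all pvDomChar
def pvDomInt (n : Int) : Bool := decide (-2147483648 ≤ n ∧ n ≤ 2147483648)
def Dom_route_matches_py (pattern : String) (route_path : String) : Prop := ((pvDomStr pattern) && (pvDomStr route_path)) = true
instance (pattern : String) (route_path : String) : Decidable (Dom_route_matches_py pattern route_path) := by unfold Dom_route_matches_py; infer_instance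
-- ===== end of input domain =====

-- B replaces A's explicit length check + for-loop over zip with one lock-step recursion
-- over the two segment lists (objective: alternative decomposition, same cost).

-- s.split("/") — the separator is the nonempty literal "/", so Python never raises here.
def pvSplitSlash (s : String) : List String := (PySem.Str.split? s "/").getD []

-- ===== PORT A =====
-- the for-loop over zip(pattern_parts, route_parts) with its early return
def route_matches_py_loop : List (String × String) → Bool
  | [] => true
  | (pattern_part, route_part) :: rest =>
    if PySem.Str.startswith pattern_part "{" && PySem.Str.endswith pattern_part "}" then
      route_matches_py_loop rest            -- continue: placeholder matches anything
    else if pattern_part ≠ route_part then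
      false                                  -- early return False
    else
      route_matches_py_loop rest

def route_matches_py (pattern : String) (route_path : String) : Bool :=
  let pattern_parts := pvSplitSlash pattern
  let route_parts := pvSplitSlash route_path
  if pattern_parts.length ≠ route_parts.length then false
  else route_matches_py_loop (pattern_parts.zip route_parts)

-- ===== PORT B =====
-- lock-step recursion over both segment lists; a length mismatch falls out structurally
def route_matches_py_go : List String → List String → Bool
  | [], [] => true
  | [], _ :: _ => false
  | _ :: _, [] => false
  | p :: ps, r :: rs =>
    if p == r || (PySem.Str.startswith p "{" && PySem.Str.endswith p "}") then
      route_matches_py_go ps rs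
    else
      false

def route_matches_py_alt (pattern : String) (route_path : String) : Bool :=
  route_matches_py_go (pvSplitSlash pattern) (pvSplitSlash route_path)

-- ===== PRECONDITION & SPEC =====
def Spec_route_matches_py (pattern : String) (route_path : String) (out : Bool) : Prop := out = route_matches_py_alt pattern route_path
instance (pattern : String) (route_path : String) (out : Bool) : Decidable (Spec_route_matches_py pattern route_path out) := by unfold Spec_route_matches_py; infer_instance

-- ===== CLAIM (what is proved, stated in full; the proofs are below) =====
def Claim_equal_route_matches_py : Prop := ∀ (pattern : String) (route_path : String), Dom_route_matches_py pattern route_path → Spec_route_matches_py pattern route_path (route_matches_py pattern route_path)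

-- ===== LEMMAS AND PROOFS =====
lemma route_loop_eq_go (ps rs : List String) :
    (if ps.length ≠ rs.length then false else route_matches_py_loop (ps.zip rs)) =
      route_matches_py_go ps rs := by
  induction ps generalizing rs with
  | nil =>
    cases rs <;> simp [route_matches_py_loop, route_matches_py_go]
  | cons p ps ih =>
    cases rs with
    | nil => simp [route_matches_py_go]
    | cons r rs =>
      by_cases hlen : ps.length = rs.length
      · by_cases heq : p = r
        · simp [route_matches_py_loop, route_matches_py_go, heq, hlen, ← ih rs]
        · simp [route_matches_py_loop, route_matches_py_go, heq, hlen, ← ih rs]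
      · have hgo : route_matches_py_go ps rs = false := by
          rw [← ih rs]; simp [hlen]
        simp [route_matches_py_go, hgo, List.length_cons, hlen]

-- ===== VERDICT (by name: the statement is the Claim_ definition above) =====
theorem route_matches_py_spec : Claim_equal_route_matches_py := by
  intro pattern route_path _
  unfold Spec_route_matches_py route_matches_py route_matches_py_alt
  exact route_loop_eq_go _ _
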